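-- pv_equiv track=rewrite | github.com/SvenHauns/INSIGHT_RNA | DMS/scripts/create_profile (Copy).py | create_gene_sublist
-- ===== SOURCE A (Python) =====
-- def create_gene_sublist(starts, ends, exon_number):
--
--
--     full_gene_exons_start = []
--     full_gene_exons_end = []
--
--     for enum, start in enumerate(starts):
--         exons = exon_number[enum]
--
--         exon_list_start_full = []
--         exon_list_end_full = []
--
--         exon_list_start = []
--         exon_list_end = []
--
--         last_ex = 1
--
--         for ex_num, ex in enumerate(exons):
--             if ex > last_ex:
--                 exon_list_start.append(starts[enum][ex_num])
--                 exon_list_end.append(ends[enum][ex_num])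
--
--
--                 last_ex = ex
--
--             else:
--                 if exon_list_start != []: exon_list_start_full.append(exon_list_start)
--                 if exon_list_end != []: exon_list_end_full.append(exon_list_end)
--
--                 exon_list_start = []
--                 exon_list_end = []
--
--                 exon_list_start.append(starts[enum][ex_num])
--                 exon_list_end.append(ends[enum][ex_num])
--
--                 last_ex = ex
--
--         if  exon_list_start != []:exon_list_start_full.append(exon_list_start)
--         if  exon_list_end != []: exon_list_end_full.append(exon_list_end)
--
--         full_gene_exons_start.append(exon_list_start_full)
--         full_gene_exons_end.append(exon_list_end_full)
--
--
--
--     return full_gene_exons_start, full_gene_exons_end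
-- ===== SOURCE B (Python) =====
-- def create_gene_sublist(starts, ends, exon_number):
--     full_gene_exons_start = []
--     full_gene_exons_end = []
--     for i in range(len(starts)):
--         exons = exon_number[i]
--         cuts = [j for j in range(len(exons)) if j == 0 or exons[j] <= exons[j - 1]]
--         bounds = cuts + [len(exons)]
--         full_gene_exons_start.append(
--             [[starts[i][k] for k in range(bounds[t], bounds[t + 1])] for t in range(len(cuts))])
--         full_gene_exons_end.append(
--             [[ends[i][k] for k in range(bounds[t], bounds[t + 1])] for t in range(len(cuts))])
--     return full_gene_exons_start, full_gene_exons_end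
-- ===== Notes on version B (the rewrite author's own statement) =====
-- stated objective: simpler
-- what changed: Replaces A's state machine (current-group buffers, sentinel last_ex, flush-on-break logic duplicated for starts and ends) with a two-phase decomposition: first compute the run-boundary indices from the exon numbers alone, then slice both coordinate lists by consecutive boundaries.
import Mathlib
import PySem

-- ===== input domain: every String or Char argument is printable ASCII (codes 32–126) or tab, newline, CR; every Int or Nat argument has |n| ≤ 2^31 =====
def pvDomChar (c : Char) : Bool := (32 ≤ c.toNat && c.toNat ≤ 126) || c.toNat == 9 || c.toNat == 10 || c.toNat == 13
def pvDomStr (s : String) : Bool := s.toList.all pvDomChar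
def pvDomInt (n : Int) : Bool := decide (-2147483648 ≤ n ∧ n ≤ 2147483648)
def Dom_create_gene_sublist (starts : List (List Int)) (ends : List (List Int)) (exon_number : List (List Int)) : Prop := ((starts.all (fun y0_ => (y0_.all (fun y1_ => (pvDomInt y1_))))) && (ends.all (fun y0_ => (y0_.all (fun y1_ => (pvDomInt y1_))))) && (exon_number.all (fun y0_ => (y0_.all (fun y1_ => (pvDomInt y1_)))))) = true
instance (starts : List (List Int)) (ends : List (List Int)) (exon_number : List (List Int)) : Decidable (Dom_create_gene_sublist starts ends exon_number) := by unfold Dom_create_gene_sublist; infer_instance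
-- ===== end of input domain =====

-- B replaces A's one-pass state machine (group buffers + sentinel + flush logic, duplicated for
-- starts and ends) with a two-phase decomposition: compute run-boundary indices from the exon
-- numbers, then slice both coordinate lists by consecutive boundaries (objective: simpler).

-- ===== PORT A =====
-- one step of A's inner loop; state = (exon_list_start_full, exon_list_end_full, exon_list_start, exon_list_end, last_ex)
def cgsStepA (srow erow : List Int)
    (st : List (List Int) × List (List Int) × List Int × List Int × Int) (p : Int × Int) :
    List (List Int) × List (List Int) × List Int × List Int × Int :=
  if p.2 > st.2.2.2.2 then
    (st.1, st.2.1, st.2.2.1 ++ [PySem.List.pyGetD srow p.1 0],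
     st.2.2.2.1 ++ [PySem.List.pyGetD erow p.1 0], p.2)
  else
    ((if st.2.2.1 ≠ [] then st.1 ++ [st.2.2.1] else st.1),
     (if st.2.2.2.1 ≠ [] then st.2.1 ++ [st.2.2.2.1] else st.2.1),
     [PySem.List.pyGetD srow p.1 0], [PySem.List.pyGetD erow p.1 0], p.2)

-- A's per-gene body: the loop over enumerate(exons) followed by the final flush
def cgsGeneA (srow erow exons : List Int) : List (List Int) × List (List Int) :=
  let r := (PySem.List.enumerate exons 0).foldl (cgsStepA srow erow) ([], [], [], [], 1)
  ((if r.2.2.1 ≠ [] then r.1 ++ [r.2.2.1] else r.1),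
   (if r.2.2.2.1 ≠ [] then r.2.1 ++ [r.2.2.2.1] else r.2.1))

def create_gene_sublist (starts : List (List Int)) (ends : List (List Int)) (exon_number : List (List Int)) : List (List (List Int)) × List (List (List Int)) :=
  (PySem.List.enumerate starts 0).foldl
    (fun acc p =>
      let g := cgsGeneA (PySem.List.pyGetD starts p.1 []) (PySem.List.pyGetD ends p.1 [])
                 (PySem.List.pyGetD exon_number p.1 [])
      (acc.1 ++ [g.1], acc.2 ++ [g.2]))
    ([], [])

-- ===== PORT B =====
-- B's per-gene body: cut indices from the exon numbers, then slice both rows by consecutive bounds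
def cgsGeneB (srow erow exons : List Int) : List (List Int) × List (List Int) :=
  let cuts := (PySem.List.pyRange 0 (exons.length : Int) 1).filter
      (fun j => (j == 0) || decide (PySem.List.pyGetD exons j 0 ≤ PySem.List.pyGetD exons (j - 1) 0))
  let bounds := cuts ++ [(exons.length : Int)]
  ((PySem.List.pyRange 0 (cuts.length : Int) 1).map (fun t =>
      (PySem.List.pyRange (PySem.List.pyGetD bounds t 0) (PySem.List.pyGetD bounds (t + 1) 0) 1).map
        (fun k => PySem.List.pyGetD srow k 0)),
   (PySem.List.pyRange 0 (cuts.length : Int) 1).map (fun t =>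
      (PySem.List.pyRange (PySem.List.pyGetD bounds t 0) (PySem.List.pyGetD bounds (t + 1) 0) 1).map
        (fun k => PySem.List.pyGetD erow k 0)))

def create_gene_sublist_alt (starts : List (List Int)) (ends : List (List Int)) (exon_number : List (List Int)) : List (List (List Int)) × List (List (List Int)) :=
  (PySem.List.pyRange 0 (starts.length : Int) 1).foldl
    (fun acc i =>
      let g := cgsGeneB (PySem.List.pyGetD starts i []) (PySem.List.pyGetD ends i [])
                 (PySem.List.pyGetD exon_number i [])
      (acc.1 ++ [g.1], acc.2 ++ [g.2]))
    ([], [])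

-- ===== PRECONDITION & SPEC =====
-- Pre_ = exactly the inputs where Python A returns normally (no IndexError): every gene index has
-- an exon list, and each nonempty exon list is covered by its start and end coordinate rows.
def Pre_create_gene_sublist (starts : List (List Int)) (ends : List (List Int)) (exon_number : List (List Int)) : Prop :=
  starts.length ≤ exon_number.length ∧
  ∀ i < starts.length,
    exon_number.getD i [] ≠ [] →
      i < ends.length ∧
      (exon_number.getD i []).length ≤ (starts.getD i []).length ∧
      (exon_number.getD i []).length ≤ (ends.getD i []).length

instance (starts : List (List Int)) (ends : List (List Int)) (exon_number : List (List Int)) : Decidable (Pre_create_gene_sublist starts ends exon_number) := by unfold Pre_create_gene_sublist; infer_instance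

def pvWitness_create_gene_sublist : List (List Int) × List (List Int) × List (List Int) :=
  ([[1, 2], [3]], [[10, 20], [30]], [[1, 2], [1]])

def Spec_create_gene_sublist (starts : List (List Int)) (ends : List (List Int)) (exon_number : List (List Int)) (out : List (List (List Int)) × List (List (List Int))) : Prop := out = create_gene_sublist_alt starts ends exon_number
instance (starts : List (List Int)) (ends : List (List Int)) (exon_number : List (List Int)) (out : List (List (List Int)) × List (List (List Int))) : Decidable (Spec_create_gene_sublist starts ends exon_number out) := by unfold Spec_create_gene_sublist; infer_instance

-- ===== CLAIM (what is proved, stated in full; the proofs are below) =====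
def Claim_equal_create_gene_sublist : Prop := ∀ (starts : List (List Int)) (ends : List (List Int)) (exon_number : List (List Int)), Dom_create_gene_sublist starts ends exon_number → Pre_create_gene_sublist starts ends exon_number → Spec_create_gene_sublist starts ends exon_number (create_gene_sublist starts ends exon_number)

-- ===== LEMMAS AND PROOFS =====

-- runs of consecutive positions (structural view, used for A's loop): a new run starts whenever
-- the next exon number fails to strictly increase
def chop : Int → List Int → List (List Int)
  | _, [] => []
  | off, [_] => [[off]]
  | off, ex :: ex' :: rest =>
    if ex' > ex then
      match chop (off + 1) (ex' :: rest) with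
      | [] => [[off]]
      | h :: t => (off :: h) :: t
    else [off] :: chop (off + 1) (ex' :: rest)

theorem chop_ne_nil (off : Int) (l : List Int) (h : l ≠ []) : chop off l ≠ [] := by
  match l with
  | [] => exact absurd rfl h
  | [ex] => simp [chop]
  | ex :: ex' :: rest =>
    simp only [chop]
    split
    · cases hc : chop (off + 1) (ex' :: rest) <;> simp
    · simp

-- indexed view of the same runs (used for B's filter/slice computation)
def chopIdx (exons : List Int) (a : Nat) : List (List Int) :=
  if h : a < exons.length then
    if a + 1 < exons.length ∧ exons.getD a 0 < exons.getD (a + 1) 0 then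
      match chopIdx exons (a + 1) with
      | [] => [[(a : Int)]]
      | h :: t => (((a : Int)) :: h) :: t
    else [(a : Int)] :: chopIdx exons (a + 1)
  else []
termination_by exons.length - a

def cutN (exons : List Int) (j : Nat) : Prop := exons.getD j 0 ≤ exons.getD (j - 1) 0

-- runs between consecutive bounds
def consec (F : Int → Int → List Int) : Int → List Int → List (List Int)
  | _, [] => []
  | cur, b :: bs => F cur b :: consec F b bs

theorem consec_map (F : Int → Int → List Int) (g : Int → Int) (cur : Int) (bs : List Int) :
    consec (fun x y => (F x y).map g) cur bs = (consec F cur bs).map (List.map g) := by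
  induction bs generalizing cur with
  | nil => rfl
  | cons b bs ih => simp [consec, ih]

theorem loopA_spec (srow erow : List Int) (exons : List Int) :
    ∀ (off : Int) (sf ef : List (List Int)) (cs ce : List Int) (last : Int),
    (let r := (PySem.List.enumerate exons off).foldl (cgsStepA srow erow) (sf, ef, cs, ce, last);
     ((if r.2.2.1 ≠ [] then r.1 ++ [r.2.2.1] else r.1),
      (if r.2.2.2.1 ≠ [] then r.2.1 ++ [r.2.2.2.1] else r.2.1)))
    =
    match exons with
    | [] => ((if cs ≠ [] then sf ++ [cs] else sf), (if ce ≠ [] then ef ++ [ce] else ef))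
    | ex :: _ =>
      if ex > last then
        (sf ++ (cs ++ ((chop off exons).headD []).map (fun j => PySem.List.pyGetD srow j 0)) ::
              ((chop off exons).tail.map (fun r => r.map (fun j => PySem.List.pyGetD srow j 0))),
         ef ++ (ce ++ ((chop off exons).headD []).map (fun j => PySem.List.pyGetD erow j 0)) ::
              ((chop off exons).tail.map (fun r => r.map (fun j => PySem.List.pyGetD erow j 0))))
      else
        ((if cs ≠ [] then sf ++ [cs] else sf) ++
           (chop off exons).map (fun r => r.map (fun j => PySem.List.pyGetD srow j 0)),
         (if ce ≠ [] then ef ++ [ce] else ef) ++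
           (chop off exons).map (fun r => r.map (fun j => PySem.List.pyGetD erow j 0))) := by
  induction exons with
  | nil =>
    intro off sf ef cs ce last
    simp [PySem.List.enumerate_nil]
  | cons ex rest ih =>
    intro off sf ef cs ce last
    rw [PySem.List.enumerate_cons, List.foldl_cons]
    by_cases hgt : ex > last
    · rw [show cgsStepA srow erow (sf, ef, cs, ce, last) (off, ex)
          = (sf, ef, cs ++ [PySem.List.pyGetD srow off 0], ce ++ [PySem.List.pyGetD erow off 0], ex)
        from by simp [cgsStepA, hgt]]
      rw [ih (off + 1) sf ef _ _ ex]
      cases rest with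
      | nil => simp [chop, hgt]
      | cons ex' rest' =>
        by_cases h2 : ex' > ex
        · obtain ⟨h, t, hht⟩ :=
            List.exists_cons_of_ne_nil (chop_ne_nil (off + 1) (ex' :: rest') (by simp))
          simp [chop, hgt, h2, hht]
        · simp [chop, hgt, h2]
    · rw [show cgsStepA srow erow (sf, ef, cs, ce, last) (off, ex)
          = ((if cs ≠ [] then sf ++ [cs] else sf), (if ce ≠ [] then ef ++ [ce] else ef),
             [PySem.List.pyGetD srow off 0], [PySem.List.pyGetD erow off 0], ex)
        from by simp [cgsStepA, hgt]]
      rw [ih (off + 1) _ _ _ _ ex]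
      cases rest with
      | nil => simp [chop, hgt]
      | cons ex' rest' =>
        by_cases h2 : ex' > ex
        · obtain ⟨h, t, hht⟩ :=
            List.exists_cons_of_ne_nil (chop_ne_nil (off + 1) (ex' :: rest') (by simp))
          simp [chop, hgt, h2, hht]
        · simp [chop, hgt, h2]

theorem chopIdx_stop (exons : List Int) (a : Nat) (h : exons.length ≤ a) : chopIdx exons a = [] := by
  rw [chopIdx]; simp [Nat.not_lt.mpr h]

theorem chop_eq_chopIdx (l : List Int) : ∀ (pre : List Int),
    chop (pre.length : Int) l = chopIdx (pre ++ l) pre.length := by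
  induction l with
  | nil => intro pre; rw [chopIdx]; simp [chop]
  | cons ex rest ih =>
    intro pre
    have hx : (pre ++ ex :: rest).getD pre.length 0 = ex := by
      simp
    cases rest with
    | nil =>
      rw [chopIdx, chopIdx_stop _ (pre.length + 1) (by simp)]
      simp [chop]
    | cons ex' rest' =>
      have hx' : (pre ++ ex :: ex' :: rest').getD (pre.length + 1) 0 = ex' := by
        simp
      have hrec : chop ((pre.length : Int) + 1) (ex' :: rest')
          = chopIdx (pre ++ ex :: ex' :: rest') (pre.length + 1) := by
        have h := ih (pre ++ [ex])
        simp only [List.length_append, List.length_cons, List.length_nil,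
          List.append_assoc, List.singleton_append] at h
        exact_mod_cast h
      rw [chopIdx]
      have hlt : pre.length < (pre ++ ex :: ex' :: rest').length := by simp
      have hlt1 : pre.length + 1 < (pre ++ ex :: ex' :: rest').length := by simp
      by_cases h2 : ex < ex'
      · simp only [chop, gt_iff_lt, if_pos h2, hrec, dif_pos hlt, hx, hx',
          if_pos (⟨hlt1, h2⟩ : _ ∧ _)]
      · simp only [chop, gt_iff_lt, if_neg h2, hrec, dif_pos hlt, hx, hx']
        rw [if_neg (by intro hc; exact h2 hc.2)]

theorem chopIdx_split (exons : List Int) :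
    ∀ (k cur a : Nat), cur + k + 1 = a → a ≤ exons.length →
    (∀ j, cur < j → j < a → ¬ cutN exons j) →
    (a = exons.length ∨ (a < exons.length ∧ cutN exons a)) →
    chopIdx exons cur = PySem.List.pyRange (cur : Int) (a : Int) 1 :: chopIdx exons a := by
  intro k
  induction k with
  | zero =>
    intro cur a hk ha _ hcut
    have haeq : a = cur + 1 := by omega
    subst haeq
    have hcurlt : cur < exons.length := by omega
    have hrange : PySem.List.pyRange (cur : Int) ((cur + 1 : Nat) : Int) 1 = [(cur : Int)] := by
      have h1 : ((cur + 1 : Nat) : Int) = (cur : Int) + 1 := by push_cast; ring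
      rw [h1, PySem.List.pyRange_one_singleton]
    rcases hcut with h | ⟨_, hcut⟩
    · rw [chopIdx, dif_pos hcurlt, if_neg (by omega), chopIdx_stop _ _ (le_of_eq h.symm), hrange]
    · rw [chopIdx, dif_pos hcurlt, if_neg (by
        rintro ⟨-, hlt2⟩
        unfold cutN at hcut
        rw [show cur + 1 - 1 = cur by omega] at hcut
        exact absurd hcut (not_le.mpr hlt2)), hrange]
  | succ k ihk =>
    intro cur a hk ha hbetween hcut
    have hcur1 : ¬ cutN exons (cur + 1) := hbetween (cur + 1) (by omega) (by omega)
    have hmono : exons.getD cur 0 < exons.getD (cur + 1) 0 := by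
      unfold cutN at hcur1
      simpa using not_le.mp hcur1
    rw [chopIdx, dif_pos (by omega : cur < exons.length), if_pos ⟨by omega, hmono⟩,
      ihk (cur + 1) a (by omega) ha (fun j h1 h2 => hbetween j (by omega) h2) hcut,
      PySem.List.pyRange_one_cons (by exact_mod_cast Nat.lt_of_succ_le (by omega) : (cur : Int) < (a : Int))]
    push_cast
    rfl

theorem filter_cuts_spec (exons : List Int) :
    ∀ (k a cur : Nat), a + k = exons.length → cur < a →
    (∀ j, cur < j → j < a → ¬ cutN exons j) →
    consec (fun x y => PySem.List.pyRange x y 1) (cur : Int)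
      (((PySem.List.pyRange (a : Int) (exons.length : Int) 1).filter
          (fun j => (j == 0) || decide (PySem.List.pyGetD exons j 0 ≤ PySem.List.pyGetD exons (j - 1) 0))) ++ [(exons.length : Int)])
    = chopIdx exons cur := by
  intro k
  induction k with
  | zero =>
    intro a cur hk hca hbet
    have ha : a = exons.length := by omega
    rw [ha, PySem.List.pyRange_one_eq_nil (le_refl _), List.filter_nil, List.nil_append, consec, consec,
      chopIdx_split exons (exons.length - cur - 1) cur exons.length (by omega) (le_refl _)
        (fun j h1 h2 => hbet j h1 (by omega)) (Or.inl rfl),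
      chopIdx_stop _ _ (le_refl _)]
  | succ k ihk =>
    intro a cur hk hca hbet
    have halt : a < exons.length := by omega
    rw [PySem.List.pyRange_one_cons (by exact_mod_cast halt), List.filter_cons]
    have hane : (((a : Int)) == 0) = false := by
      simp only [beq_eq_false_iff_ne, ne_eq]
      intro hc
      omega
    have hsub : ((a : Int) - 1) = ((a - 1 : Nat) : Int) := by omega
    have hcast : ((a : Int) + 1) = ((a + 1 : Nat) : Int) := by omega
    by_cases hcut : cutN exons a
    · have hp : ((((a : Int)) == 0) ||
          decide (PySem.List.pyGetD exons (a : Int) 0 ≤ PySem.List.pyGetD exons ((a : Int) - 1) 0)) = true := by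
        rw [hane, hsub, PySem.List.pyGetD_natCast, PySem.List.pyGetD_natCast]
        simpa using hcut
      rw [if_pos hp, List.cons_append, consec, hcast,
        ihk (a + 1) a (by omega) (by omega) (fun j h1 h2 => by omega),
        ← chopIdx_split exons (a - cur - 1) cur a (by omega) (le_of_lt halt) hbet
          (Or.inr ⟨halt, hcut⟩)]
    · have hp : ¬ (((((a : Int)) == 0) ||
          decide (PySem.List.pyGetD exons (a : Int) 0 ≤ PySem.List.pyGetD exons ((a : Int) - 1) 0)) = true) := by
        rw [hane, hsub, PySem.List.pyGetD_natCast, PySem.List.pyGetD_natCast]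
        unfold cutN at hcut
        simp only [List.getD_eq_getElem?_getD] at hcut ⊢
        simpa using hcut
      rw [if_neg hp, hcast]
      exact ihk (a + 1) cur (by omega) (by omega)
        (fun j h1 h2 => by
          by_cases hja : j = a
          · exact hja ▸ hcut
          · exact hbet j h1 (by omega))

theorem pyGetD_cons_shift (x : Int) (xs : List Int) (u : Nat) :
    PySem.List.pyGetD (x :: xs) ((u : Int) + 1) 0 = PySem.List.pyGetD xs (u : Int) 0 := by
  rw [show ((u : Int) + 1) = ((u + 1 : Nat) : Int) by push_cast; ring,
    PySem.List.pyGetD_natCast, PySem.List.pyGetD_natCast, List.getD_cons_succ]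

theorem map_consec_lookup (F : Int → Int → List Int) (c : Int) (bs : List Int) :
    (PySem.List.pyRange 0 (bs.length : Int) 1).map
      (fun t => F (PySem.List.pyGetD (c :: bs) t 0) (PySem.List.pyGetD (c :: bs) (t + 1) 0))
    = consec F c bs := by
  have key : ∀ (bs : List Int) (c : Int),
      (List.range bs.length).map
        (fun (u : Nat) => F (PySem.List.pyGetD (c :: bs) ((u : Nat) : Int) 0)
                    (PySem.List.pyGetD (c :: bs) (((u : Nat) : Int) + 1) 0))
      = consec F c bs := by
    intro bs
    induction bs with
    | nil => intro c; simp [consec]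
    | cons b bs ih =>
      intro c
      rw [List.length_cons, List.range_succ_eq_map, List.map_cons, List.map_map, consec]
      congr 1
      · rw [show ((0 : Nat) : Int) = 0 by norm_num, PySem.List.pyGetD_zero_cons,
          show (0 : Int) + 1 = ((1 : Nat) : Int) by norm_num, PySem.List.pyGetD_natCast]
        simp [List.getD]
      · rw [← ih b]
        refine List.map_congr_left fun u _ => ?_
        simp only [Function.comp_apply, Nat.succ_eq_add_one]
        rw [pyGetD_cons_shift c (b :: bs) (u + 1),
          show ((u + 1 : Nat) : Int) = (u : Int) + 1 by push_cast; ring,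
          pyGetD_cons_shift c (b :: bs) u]
  rw [PySem.List.pyRange_zero_natCast, List.map_map]
  exact key bs c

theorem map_consec_lookup' (g : Int → Int) (c : Int) (bs : List Int) :
    (PySem.List.pyRange 0 (bs.length : Int) 1).map
      (fun t => (PySem.List.pyRange (PySem.List.pyGetD (c :: bs) t 0)
                  (PySem.List.pyGetD (c :: bs) (t + 1) 0) 1).map g)
    = consec (fun x y => (PySem.List.pyRange x y 1).map g) c bs :=
  map_consec_lookup (fun x y => (PySem.List.pyRange x y 1).map g) c bs

theorem cuts_head (exons : List Int) (h : exons ≠ []) :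
    (PySem.List.pyRange 0 (exons.length : Int) 1).filter
        (fun j => (j == 0) || decide (PySem.List.pyGetD exons j 0 ≤ PySem.List.pyGetD exons (j - 1) 0))
    = 0 :: (PySem.List.pyRange ((1 : Nat) : Int) (exons.length : Int) 1).filter
        (fun j => (j == 0) || decide (PySem.List.pyGetD exons j 0 ≤ PySem.List.pyGetD exons (j - 1) 0)) := by
  have hn : (0 : Int) < (exons.length : Int) := by
    cases exons with
    | nil => exact absurd rfl h
    | cons x xs => simp
  rw [PySem.List.pyRange_one_cons hn]
  rw [List.filter_cons]
  norm_num

theorem geneB_one (row exons : List Int) :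
    (PySem.List.pyRange 0
        (((PySem.List.pyRange 0 (exons.length : Int) 1).filter
            (fun j => (j == 0) || decide (PySem.List.pyGetD exons j 0 ≤ PySem.List.pyGetD exons (j - 1) 0))).length : Int) 1).map
      (fun t =>
        (PySem.List.pyRange
          (PySem.List.pyGetD
            (((PySem.List.pyRange 0 (exons.length : Int) 1).filter
                (fun j => (j == 0) || decide (PySem.List.pyGetD exons j 0 ≤ PySem.List.pyGetD exons (j - 1) 0))) ++ [(exons.length : Int)]) t 0)
          (PySem.List.pyGetD
            (((PySem.List.pyRange 0 (exons.length : Int) 1).filter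
                (fun j => (j == 0) || decide (PySem.List.pyGetD exons j 0 ≤ PySem.List.pyGetD exons (j - 1) 0))) ++ [(exons.length : Int)]) (t + 1) 0) 1).map
          (fun k => PySem.List.pyGetD row k 0))
    = (chopIdx exons 0).map (List.map (fun j => PySem.List.pyGetD row j 0)) := by
  by_cases hex : exons = []
  · subst hex
    rw [chopIdx_stop _ _ (by simp)]
    simp [PySem.List.pyRange_one_eq_nil]
  · rw [cuts_head exons hex, List.cons_append, List.length_cons,
      show ((((PySem.List.pyRange ((1 : Nat) : Int) (exons.length : Int) 1).filter
            (fun j => (j == 0) || decide (PySem.List.pyGetD exons j 0 ≤ PySem.List.pyGetD exons (j - 1) 0))).length + 1 : Nat) : Int)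
        = ((((PySem.List.pyRange ((1 : Nat) : Int) (exons.length : Int) 1).filter
            (fun j => (j == 0) || decide (PySem.List.pyGetD exons j 0 ≤ PySem.List.pyGetD exons (j - 1) 0))) ++ [(exons.length : Int)]).length : Int)
        from by simp,
      map_consec_lookup' (fun k => PySem.List.pyGetD row k 0),
      consec_map (fun x y => PySem.List.pyRange x y 1) (fun k => PySem.List.pyGetD row k 0)]
    have hfc := filter_cuts_spec exons (exons.length - 1) 1 0
      (by have h0 : 0 < exons.length := List.length_pos_of_ne_nil hex; omega)
      (by omega) (fun j h1 h2 => absurd h2 (by omega))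
    norm_num at hfc ⊢
    rw [hfc]

theorem geneB_eq (srow erow exons : List Int) :
    cgsGeneB srow erow exons =
      ((chopIdx exons 0).map (List.map (fun j => PySem.List.pyGetD srow j 0)),
       (chopIdx exons 0).map (List.map (fun j => PySem.List.pyGetD erow j 0))) := by
  unfold cgsGeneB
  exact Prod.ext (geneB_one srow exons) (geneB_one erow exons)

theorem geneA_eq (srow erow exons : List Int) :
    cgsGeneA srow erow exons =
      ((chop 0 exons).map (List.map (fun j => PySem.List.pyGetD srow j 0)),
       (chop 0 exons).map (List.map (fun j => PySem.List.pyGetD erow j 0))) := by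
  have H := loopA_spec srow erow exons 0 [] [] [] [] 1
  unfold cgsGeneA
  rw [H]
  cases exons with
  | nil => simp [chop]
  | cons ex rest =>
    by_cases hgt : ex > 1
    · obtain ⟨h, t, hht⟩ :=
        List.exists_cons_of_ne_nil (chop_ne_nil 0 (ex :: rest) (by simp))
      simp [hgt, hht]
    · simp [hgt]

theorem geneA_eq_geneB (srow erow exons : List Int) :
    cgsGeneA srow erow exons = cgsGeneB srow erow exons := by
  have hb := geneB_eq srow erow exons
  have ha := geneA_eq srow erow exons
  have hc : chop 0 exons = chopIdx exons 0 := by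
    have := chop_eq_chopIdx exons []
    simpa using this
  rw [ha, hb, hc]

-- ===== VERDICT (by name: the statement is the Claim_ definition above) =====
theorem create_gene_sublist_spec : Claim_equal_create_gene_sublist := by
  intro starts ends exon_number _ _
  unfold Spec_create_gene_sublist create_gene_sublist create_gene_sublist_alt
  rw [PySem.List.enumerate_eq_map_pyRange (xs := starts) (d := ([] : List Int)), List.foldl_map]
  simp only [geneA_eq_geneB]
  rw [PySem.List.len_eq]
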